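-- pv_equiv track=rewrite | github.com/sept-usc/Wave | scripts/calculate_model_size.py | calculate_estimated_gpt2_parameters
-- ===== SOURCE A (Python) =====
-- def calculate_estimated_gpt2_parameters(
--     n_layer: int,
--     n_embd: int,
--     n_inner: int,
--     n_head: int,
--     n_positions: int,
--     vocab_size: int = 50257,
-- ) -> int:
--     """
--     Calculate estimated GPT2 model parameters (excluding layernorm, position embedding, token embedding, and FFN bias).
--
--     This gives a more focused view of core transformer parameters by excluding:
--     - Layer normalization weights and biases
--     - Position embeddings
--     - Token embeddings
--     - Bias terms in feed-forward networks
--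
--     Args:
--         n_layer: Number of transformer layers
--         n_embd: Hidden dimension (embedding size)
--         n_inner: Feed-forward network dimension
--         n_head: Number of attention heads
--         n_positions: Maximum sequence length
--         vocab_size: Vocabulary size (default: GPT2 default)
--
--     Returns:
--         Estimated number of parameters (transformer weights only)
--     """
--     # Each transformer layer
--     layer_params = 0
--     for _ in range(n_layer):
--         # Multi-head attention
--         # q_proj, k_proj, v_proj: n_embd -> n_embd (weights only, no bias)
--         qkv_proj = 3 * n_embd * n_embd
--         # out_proj: n_embd -> n_embd (weights only, no bias)
--         out_proj = n_embd * n_embd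
--
--         # MLP (weights only, no bias)
--         # c_fc: n_embd -> n_inner (weights only)
--         c_fc = n_embd * n_inner
--         # c_proj: n_inner -> n_embd (weights only)
--         c_proj = n_inner * n_embd
--
--         layer_params += qkv_proj + out_proj + c_fc + c_proj
--
--     total_params = layer_params
--     return total_params
-- ===== SOURCE B (Python) =====
-- def calculate_estimated_gpt2_parameters(
--     n_layer: int,
--     n_embd: int,
--     n_inner: int,
--     n_head: int,
--     n_positions: int,
--     vocab_size: int = 50257,
-- ) -> int:
--     """Closed form: per-layer weight count times the number of layers (no loop)."""
--     per_layer = 4 * n_embd * n_embd + 2 * n_embd * n_inner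
--     return max(n_layer, 0) * per_layer
-- ===== Notes on version B (the rewrite author's own statement) =====
-- stated objective: faster
-- what changed: Replaces the per-layer accumulation loop by a closed-form product max(n_layer,0) * (4*n_embd^2 + 2*n_embd*n_inner).
import Mathlib
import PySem

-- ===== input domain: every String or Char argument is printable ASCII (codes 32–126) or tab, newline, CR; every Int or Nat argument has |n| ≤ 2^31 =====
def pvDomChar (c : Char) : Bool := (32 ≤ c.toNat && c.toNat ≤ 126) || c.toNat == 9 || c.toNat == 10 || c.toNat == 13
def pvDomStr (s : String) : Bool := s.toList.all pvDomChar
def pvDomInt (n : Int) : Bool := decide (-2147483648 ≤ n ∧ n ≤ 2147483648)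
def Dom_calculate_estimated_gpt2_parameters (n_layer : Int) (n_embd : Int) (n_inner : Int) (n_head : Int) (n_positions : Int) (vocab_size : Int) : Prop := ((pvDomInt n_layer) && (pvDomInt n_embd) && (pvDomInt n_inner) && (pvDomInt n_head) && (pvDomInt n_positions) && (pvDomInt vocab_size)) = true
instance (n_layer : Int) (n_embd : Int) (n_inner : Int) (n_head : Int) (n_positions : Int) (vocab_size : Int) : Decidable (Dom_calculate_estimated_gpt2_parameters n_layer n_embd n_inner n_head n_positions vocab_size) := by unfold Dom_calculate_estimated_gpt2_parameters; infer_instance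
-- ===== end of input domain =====

-- B replaces A's per-layer accumulation loop by a closed-form product (objective: faster, O(1) vs O(n_layer)).

-- ===== PORT A =====
-- Literal port of A: a fold over range(n_layer) accumulating layer_params.
def calculate_estimated_gpt2_parameters (n_layer : Int) (n_embd : Int) (n_inner : Int) (_n_head : Int) (_n_positions : Int) (_vocab_size : Int) : Int :=
  let layer_params : Int :=
    (PySem.List.pyRange 0 n_layer 1).foldl
      (fun layer_params _ =>
        let qkv_proj := 3 * n_embd * n_embd
        let out_proj := n_embd * n_embd
        let c_fc := n_embd * n_inner
        let c_proj := n_inner * n_embd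
        layer_params + (qkv_proj + out_proj + c_fc + c_proj)) 0
  let total_params := layer_params
  total_params

-- ===== PORT B =====
def calculate_estimated_gpt2_parameters_alt (n_layer : Int) (n_embd : Int) (n_inner : Int) (_n_head : Int) (_n_positions : Int) (_vocab_size : Int) : Int :=
  let per_layer := 4 * n_embd * n_embd + 2 * n_embd * n_inner
  (max n_layer 0) * per_layer

-- ===== PRECONDITION & SPEC =====
def Spec_calculate_estimated_gpt2_parameters (n_layer : Int) (n_embd : Int) (n_inner : Int) (n_head : Int) (n_positions : Int) (vocab_size : Int) (out : Int) : Prop := out = calculate_estimated_gpt2_parameters_alt n_layer n_embd n_inner n_head n_positions vocab_size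
instance (n_layer : Int) (n_embd : Int) (n_inner : Int) (n_head : Int) (n_positions : Int) (vocab_size : Int) (out : Int) : Decidable (Spec_calculate_estimated_gpt2_parameters n_layer n_embd n_inner n_head n_positions vocab_size out) := by unfold Spec_calculate_estimated_gpt2_parameters; infer_instance

-- ===== CLAIM (what is proved, stated in full; the proofs are below) =====
def Claim_equal_calculate_estimated_gpt2_parameters : Prop := ∀ (n_layer : Int) (n_embd : Int) (n_inner : Int) (n_head : Int) (n_positions : Int) (vocab_size : Int), Dom_calculate_estimated_gpt2_parameters n_layer n_embd n_inner n_head n_positions vocab_size → Spec_calculate_estimated_gpt2_parameters n_layer n_embd n_inner n_head n_positions vocab_size (calculate_estimated_gpt2_parameters n_layer n_embd n_inner n_head n_positions vocab_size)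

-- ===== LEMMAS AND PROOFS =====

-- Folding "add a constant" over any list adds (length · constant).
theorem foldl_add_const (l : List Int) (c s : Int) :
    l.foldl (fun a (_ : Int) => a + c) s = s + l.length * c := by
  induction l generalizing s with
  | nil => simp
  | cons x xs ih => simp [List.foldl, ih]; ring

-- ===== VERDICT (by name: the statement is the Claim_ definition above) =====
theorem calculate_estimated_gpt2_parameters_spec : Claim_equal_calculate_estimated_gpt2_parameters := by
  intro n_layer n_embd n_inner n_head n_positions vocab_size _
  unfold Spec_calculate_estimated_gpt2_parameters
  unfold calculate_estimated_gpt2_parameters calculate_estimated_gpt2_parameters_alt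
  simp only [foldl_add_const, PySem.List.length_pyRange_one]
  have h : ((n_layer - 0).toNat : Int) = max n_layer 0 := by omega
  rw [h]; ring
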